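-- pv_equiv track=rewrite | github.com/harshad018/AI-Lab | nqueens.py | get_best_neighbor
-- ===== SOURCE A (Python) =====
-- def compute_heuristic(state):
--     h = 0
--     n = len(state)
--     for i in range(n):
--         for j in range(i + 1, n):
--             if state[i] == state[j] or abs(state[i] - state[j]) == abs(i - j):
--                 h += 1
--     return h
--
-- def get_best_neighbor(state):
--     n = len(state)
--     best_state = state[:]
--     min_h = compute_heuristic(state)
--
--     for col in range(n):
--         original_row = state[col]
--         for row in range(n):
--             if row != original_row:
--                 state[col] = row
--                 h = compute_heuristic(state)
--                 if h < min_h: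
--                     min_h = h
--                     best_state = state[:]
--         state[col] = original_row
--
--     return best_state, min_h
-- ===== SOURCE B (Python) =====
-- def get_best_neighbor(state):
--     """Same result as A, but each neighbor's heuristic is obtained as h0 + an
--     O(n) per-move delta instead of a full O(n^2) recount (O(n^3) vs O(n^4))."""
--     n = len(state)
--
--     def conflicts_at(col, val):
--         # conflicts of a queen with value `val` in column `col` against all others
--         c = 0
--         for j in range(n):
--             if j != col and (state[j] == val or abs(state[j] - val) == abs(j - col)):
--                 c += 1
--         return c
--
--     # base heuristic: each conflicting pair is counted twice across columns
--     h0 = sum(conflicts_at(i, state[i]) for i in range(n)) // 2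
--
--     min_h = h0
--     best = None  # (col, row) of best single move, first in scan order
--     for col in range(n):
--         base = conflicts_at(col, state[col])
--         for row in range(n):
--             if row != state[col]:
--                 h = h0 - base + conflicts_at(col, row)
--                 if h < min_h:
--                     min_h = h
--                     best = (col, row)
--
--     best_state = state[:]
--     if best is not None:
--         best_state[best[0]] = best[1]
--     return best_state, min_h
-- ===== Notes on version B (the rewrite author's own statement) =====
-- stated objective: faster
-- what changed: Instead of re-running the O(n^2) pairwise heuristic for every one of the n^2 neighbors, B computes the base heuristic once and evaluates each candidate move by an O(n) conflict delta for the moved column, tracking only the best (col,row) move and applying it at the end.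
import Mathlib
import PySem

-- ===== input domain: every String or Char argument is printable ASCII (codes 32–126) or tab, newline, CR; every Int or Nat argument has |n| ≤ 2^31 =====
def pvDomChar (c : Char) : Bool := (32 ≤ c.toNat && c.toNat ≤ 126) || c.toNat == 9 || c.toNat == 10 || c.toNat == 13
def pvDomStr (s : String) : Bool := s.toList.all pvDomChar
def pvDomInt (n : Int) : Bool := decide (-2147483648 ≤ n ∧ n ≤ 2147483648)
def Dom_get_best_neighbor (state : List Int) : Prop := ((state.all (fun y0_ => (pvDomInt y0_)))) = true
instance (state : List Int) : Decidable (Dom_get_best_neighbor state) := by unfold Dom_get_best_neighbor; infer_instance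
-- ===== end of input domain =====

-- B replaces A's full O(n^2) heuristic recount per neighbor by a once-computed base
-- heuristic plus an O(n) per-move conflict delta (O(n^4) -> O(n^3)); A restores its
-- in-place mutation of `state` before returning, so there is no observable side effect.

-- ===== PORT A =====
def compute_heuristic (state : List Int) : Int :=
  let n := state.length
  (List.range n).foldl (fun h i =>
    (List.range' (i + 1) (n - (i + 1))).foldl (fun h j =>
      if state.getD i 0 == state.getD j 0 ||
          |state.getD i 0 - state.getD j 0| == |(i : Int) - (j : Int)| then h + 1 else h) h) 0

def get_best_neighbor (state : List Int) : List Int × Int :=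
  let n := state.length
  (List.range n).foldl (fun (acc : List Int × Int) col =>
    let original_row := state.getD col 0
    (List.range n).foldl (fun (acc : List Int × Int) (row : Nat) =>
      if (row : Int) ≠ original_row then
        let st := state.set col (row : Int)
        let h := compute_heuristic st
        if h < acc.2 then (st, h) else acc
      else acc) acc) (state, compute_heuristic state)

-- ===== PORT B =====
-- conflicts of a queen with value v in column col against all other columns of state
def conflictsAt (state : List Int) (col : Nat) (v : Int) : Int :=
  (List.range state.length).foldl (fun c j =>
    if j != col && (state.getD j 0 == v || |state.getD j 0 - v| == |(j : Int) - (col : Int)|)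
    then c + 1 else c) 0

def get_best_neighbor_alt (state : List Int) : List Int × Int :=
  let n := state.length
  let h0 := PySem.Int.floordiv
    (((List.range n).map (fun i => conflictsAt state i (state.getD i 0))).sum) 2
  let res := (List.range n).foldl (fun (acc : Int × Option (Nat × Nat)) col =>
    let base := conflictsAt state col (state.getD col 0)
    (List.range n).foldl (fun (acc : Int × Option (Nat × Nat)) (row : Nat) =>
      if (row : Int) ≠ state.getD col 0 then
        let h := h0 - base + conflictsAt state col (row : Int)
        if h < acc.1 then (h, some (col, row)) else acc
      else acc) acc) (h0, none)
  match res.2 with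
  | none => (state, res.1)
  | some (c, r) => (state.set c (r : Int), res.1)

-- ===== PRECONDITION & SPEC =====
def Spec_get_best_neighbor (state : List Int) (out : List Int × Int) : Prop := out = get_best_neighbor_alt state
instance (state : List Int) (out : List Int × Int) : Decidable (Spec_get_best_neighbor state out) := by unfold Spec_get_best_neighbor; infer_instance

-- ===== CLAIM (what is proved, stated in full; the proofs are below) =====
def Claim_equal_get_best_neighbor : Prop := ∀ (state : List Int), Dom_get_best_neighbor state → Spec_get_best_neighbor state (get_best_neighbor state)

-- ===== LEMMAS AND PROOFS =====

-- pairwise-conflict indicator, with the same Bool condition both ports test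
def pvQ (a b d : Int) : Int := if a == b || |a - b| == d then 1 else 0

def pvF (s : List Int) (i j : Nat) : Int := pvQ (s.getD i 0) (s.getD j 0) |(i : Int) - (j : Int)|

def pvH (s : List Int) : Int :=
  ∑ i ∈ Finset.range s.length, ∑ j ∈ Finset.Ico (i + 1) s.length, pvF s i j

def pvCat (s : List Int) (col : Nat) (v : Int) : Int :=
  ∑ j ∈ Finset.range s.length, if j = col then 0 else pvQ (s.getD j 0) v |(j : Int) - (col : Int)|

-- the part of pvH that does not look at column col
def pvK (s : List Int) (col : Nat) : Int :=
  ∑ i ∈ Finset.range s.length, ∑ j ∈ Finset.Ico (i + 1) s.length,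
    if i = col ∨ j = col then 0 else pvF s i j

def pvApply (s : List Int) : Option (Nat × Nat) → List Int
  | none => s
  | some (c, r) => s.set c (r : Int)

lemma pvQ_symm (a b d : Int) : pvQ a b d = pvQ b a d := by
  simp only [pvQ, abs_sub_comm a b]
  rw [BEq.comm]

lemma pvF_symm (s : List Int) (i j : Nat) : pvF s i j = pvF s j i := by
  simp only [pvF, abs_sub_comm (i : Int) (j : Int)]
  rw [pvQ_symm]

lemma pvSumRange (n : ℕ) (f : ℕ → ℤ) : ((List.range n).map f).sum = ∑ i ∈ Finset.range n, f i := rfl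

lemma pvSumRange' (a b : ℕ) (f : ℕ → ℤ) :
    ((List.range' a b).map f).sum = ∑ i ∈ Finset.Ico a (a + b), f i := by
  rw [List.range'_eq_map_range, List.map_map, Finset.sum_Ico_eq_sum_range,
    Nat.add_sub_cancel_left]
  simp only [Function.comp_def]
  rfl

lemma pvGetDSetNe (s : List Int) (c i : ℕ) (r : Int) (h : i ≠ c) :
    (s.set c r).getD i 0 = s.getD i 0 := by
  rw [List.getD_eq_getElem?_getD, List.getD_eq_getElem?_getD, List.getElem?_set_ne (by omega)]

lemma pvGetDSetSelf (s : List Int) (c : ℕ) (r : Int) (h : c < s.length) :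
    (s.set c r).getD c 0 = r := by
  rw [List.getD_eq_getElem?_getD, List.getElem?_set_self (by omega)]
  rfl

lemma pvHeurEq (s : List Int) : compute_heuristic s = pvH s := by
  simp only [compute_heuristic, pvH]
  have hin : (fun (h : ℤ) (i : ℕ) =>
      (List.range' (i + 1) (s.length - (i + 1))).foldl (fun h j =>
        if s.getD i 0 == s.getD j 0 ||
            |s.getD i 0 - s.getD j 0| == |(i : Int) - (j : Int)| then h + 1 else h) h)
      = fun h i => h + ∑ j ∈ Finset.Ico (i + 1) ((i + 1) + (s.length - (i + 1))), pvF s i j := by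
    funext h i
    rw [PySem.List.foldl_count_if, ← PySem.List.sum_map_ite_one_zero, pvSumRange']
    rfl
  rw [hin, PySem.List.foldl_add, zero_add, pvSumRange]
  exact Finset.sum_congr rfl fun i hi =>
    by rw [Nat.add_sub_cancel' (Finset.mem_range.mp hi)]

lemma pvCatEq (s : List Int) (col : Nat) (v : Int) : conflictsAt s col v = pvCat s col v := by
  unfold conflictsAt
  rw [PySem.List.foldl_count_if, ← PySem.List.sum_map_ite_one_zero, zero_add, pvSumRange]
  refine Finset.sum_congr rfl fun j _ => ?_
  by_cases h : j = col <;> simp [h, pvQ]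

lemma pvCatSplit (s : List Int) (col : Nat) (v : Int) (hc : col < s.length) :
    pvCat s col v =
      (∑ i ∈ Finset.range col, pvQ (s.getD i 0) v |(i : Int) - (col : Int)|) +
      ∑ j ∈ Finset.Ico (col + 1) s.length, pvQ (s.getD j 0) v |(j : Int) - (col : Int)| := by
  unfold pvCat
  rw [Finset.range_eq_Ico, ← Finset.sum_Ico_consecutive _ (Nat.zero_le col) (Nat.le_of_lt hc),
    Finset.sum_eq_sum_Ico_succ_bot hc, if_pos rfl, zero_add]
  congr 1
  · exact Finset.sum_congr rfl fun i hi => if_neg (by have := (Finset.mem_Ico.mp hi).2; omega)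
  · exact Finset.sum_congr rfl fun j hj => if_neg (by have := (Finset.mem_Ico.mp hj).1; omega)

lemma pvTriangle (n : ℕ) (g : ℕ → ℕ → ℤ) :
    ∑ i ∈ Finset.range n, ∑ j ∈ Finset.range i, g i j
      = ∑ j ∈ Finset.range n, ∑ i ∈ Finset.Ico (j + 1) n, g i j := by
  rw [Finset.sum_sigma', Finset.sum_sigma']
  refine Finset.sum_nbij' (fun p => ⟨p.2, p.1⟩) (fun p => ⟨p.2, p.1⟩) ?_ ?_ ?_ ?_ ?_ <;>
    intro p hp <;>
    first
      | rfl
      | (simp only [Finset.mem_sigma, Finset.mem_range, Finset.mem_Ico] at hp ⊢; omega)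

lemma pvHDecomp (s : List Int) (col : Nat) (hc : col < s.length) :
    pvH s = pvK s col + pvCat s col (s.getD col 0) := by
  have hsplit : pvH s = pvK s col +
      ∑ i ∈ Finset.range s.length, ∑ j ∈ Finset.Ico (i + 1) s.length,
        (if i = col ∨ j = col then pvF s i j else 0) := by
    unfold pvH pvK
    rw [← Finset.sum_add_distrib]
    refine Finset.sum_congr rfl fun i _ => ?_
    rw [← Finset.sum_add_distrib]
    refine Finset.sum_congr rfl fun j _ => ?_
    by_cases h : i = col ∨ j = col <;> simp [h]
  have hE : (∑ i ∈ Finset.range s.length, ∑ j ∈ Finset.Ico (i + 1) s.length,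
      (if i = col ∨ j = col then pvF s i j else 0)) = pvCat s col (s.getD col 0) := by
    have h1 : ∀ i ∈ Finset.range s.length,
        (∑ j ∈ Finset.Ico (i + 1) s.length, (if i = col ∨ j = col then pvF s i j else 0))
          = if i = col then ∑ j ∈ Finset.Ico (col + 1) s.length, pvF s col j
            else (if i < col then pvF s i col else 0) := by
      intro i _
      by_cases hi : i = col
      · subst hi
        rw [if_pos rfl]
        exact Finset.sum_congr rfl fun j _ => if_pos (Or.inl rfl)
      · rw [if_neg hi]
        have : ∀ j ∈ Finset.Ico (i + 1) s.length,
            (if i = col ∨ j = col then pvF s i j else 0) = if j = col then pvF s i col else 0 := by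
          intro j _
          by_cases hj : j = col <;> simp [hi, hj]
        rw [Finset.sum_congr rfl this, Finset.sum_ite_eq' (Finset.Ico (i + 1) s.length) col]
        have hiff : col ∈ Finset.Ico (i + 1) s.length ↔ i < col := by
          rw [Finset.mem_Ico]; omega
        by_cases hlt : i < col
        · rw [if_pos (hiff.mpr hlt), if_pos hlt]
        · rw [if_neg (fun hm => hlt (hiff.mp hm)), if_neg hlt]
    rw [Finset.sum_congr rfl h1, Finset.range_eq_Ico,
      ← Finset.sum_Ico_consecutive _ (Nat.zero_le col) (Nat.le_of_lt hc),
      Finset.sum_eq_sum_Ico_succ_bot hc, if_pos rfl]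
    have h2 : (∑ i ∈ Finset.Ico 0 col,
        (if i = col then ∑ j ∈ Finset.Ico (col + 1) s.length, pvF s col j
          else (if i < col then pvF s i col else 0))) = ∑ i ∈ Finset.Ico 0 col, pvF s i col := by
      refine Finset.sum_congr rfl fun i hi => ?_
      have := (Finset.mem_Ico.mp hi).2
      rw [if_neg (by omega), if_pos this]
    have h3 : (∑ i ∈ Finset.Ico (col + 1) s.length,
        (if i = col then ∑ j ∈ Finset.Ico (col + 1) s.length, pvF s col j
          else (if i < col then pvF s i col else 0))) = 0 := by
      refine Finset.sum_eq_zero fun i hi => ?_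
      have := (Finset.mem_Ico.mp hi).1
      rw [if_neg (by omega), if_neg (by omega)]
    rw [h2, h3, add_zero, pvCatSplit s col _ hc, Finset.range_eq_Ico]
    congr 1
    exact Finset.sum_congr rfl fun j _ => pvF_symm s col j
  rw [hsplit, hE]

lemma pvKSet (s : List Int) (col : Nat) (r : Int) :
    pvK (s.set col r) col = pvK s col := by
  unfold pvK
  rw [List.length_set]
  refine Finset.sum_congr rfl fun i _ => Finset.sum_congr rfl fun j _ => ?_
  by_cases h : i = col ∨ j = col
  · rw [if_pos h, if_pos h]
  · have h1 : i ≠ col := fun e => h (Or.inl e)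
    have h2 : j ≠ col := fun e => h (Or.inr e)
    rw [if_neg h, if_neg h]
    unfold pvF
    rw [pvGetDSetNe s col i r h1, pvGetDSetNe s col j r h2]

lemma pvCatSet (s : List Int) (col : Nat) (r v : Int) :
    pvCat (s.set col r) col v = pvCat s col v := by
  unfold pvCat
  rw [List.length_set]
  refine Finset.sum_congr rfl fun j _ => ?_
  by_cases h : j = col
  · rw [if_pos h, if_pos h]
  · rw [if_neg h, if_neg h, pvGetDSetNe s col j r h]

lemma pvKey (s : List Int) (col : Nat) (r : Int) (hc : col < s.length) :
    compute_heuristic (s.set col r)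
      = compute_heuristic s - conflictsAt s col (s.getD col 0) + conflictsAt s col r := by
  have hc' : col < (s.set col r).length := by rw [List.length_set]; exact hc
  rw [pvHeurEq, pvHeurEq, pvCatEq, pvCatEq, pvHDecomp _ col hc', pvHDecomp s col hc,
    pvKSet, pvCatSet, pvGetDSetSelf s col r hc]
  ring

lemma pvDouble (s : List Int) :
    ((List.range s.length).map (fun i => conflictsAt s i (s.getD i 0))).sum
      = 2 * compute_heuristic s := by
  rw [pvSumRange, pvHeurEq]
  have h1 : ∀ i ∈ Finset.range s.length, conflictsAt s i (s.getD i 0)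
      = (∑ k ∈ Finset.range i, pvF s k i) + ∑ j ∈ Finset.Ico (i + 1) s.length, pvF s j i := by
    intro i hi
    rw [pvCatEq, pvCatSplit s i _ (Finset.mem_range.mp hi)]
    rfl
  rw [Finset.sum_congr rfl h1, Finset.sum_add_distrib]
  have h2 : (∑ i ∈ Finset.range s.length, ∑ k ∈ Finset.range i, pvF s k i) = pvH s := by
    rw [pvTriangle s.length (fun i k => pvF s k i)]
    rfl
  have h3 : (∑ i ∈ Finset.range s.length, ∑ j ∈ Finset.Ico (i + 1) s.length, pvF s j i) = pvH s := by
    unfold pvH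
    exact Finset.sum_congr rfl fun i _ => Finset.sum_congr rfl fun j _ => pvF_symm s j i
  rw [h2, h3]
  ring

lemma pvFoldlRel {α β γ : Type} (R : α → β → Prop) (f : α → γ → α) (g : β → γ → β)
    (l : List γ) (hs : ∀ c ∈ l, ∀ a b, R a b → R (f a c) (g b c)) :
    ∀ {a : α} {b : β}, R a b → R (l.foldl f a) (l.foldl g b) := by
  induction l with
  | nil => intro a b h; exact h
  | cons x xs ih =>
    intro a b h
    exact ih (fun c hc => hs c (List.mem_cons_of_mem _ hc)) (hs x List.mem_cons_self _ _ h)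

-- proof-side copies of the two inner loop bodies and the move-application map
def pvStepA (state : List Int) (col : Nat) (acc : List Int × Int) (row : Nat) : List Int × Int :=
  if (row : Int) ≠ state.getD col 0 then
    (if compute_heuristic (state.set col (row : Int)) < acc.2
      then (state.set col (row : Int), compute_heuristic (state.set col (row : Int))) else acc)
  else acc

def pvStepB (state : List Int) (H : Int) (col : Nat) (acc : Int × Option (Nat × Nat)) (row : Nat) :
    Int × Option (Nat × Nat) :=
  if (row : Int) ≠ state.getD col 0 then
    (if H - conflictsAt state col (state.getD col 0) + conflictsAt state col (row : Int) < acc.1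
      then (H - conflictsAt state col (state.getD col 0) + conflictsAt state col (row : Int),
            some (col, row)) else acc)
  else acc

def pvH0 (state : List Int) : Int :=
  PySem.Int.floordiv (((List.range state.length).map (fun i => conflictsAt state i (state.getD i 0))).sum) 2

def pvRel (state : List Int) (a : List Int × Int) (b : Int × Option (Nat × Nat)) : Prop :=
  a.1 = pvApply state b.2 ∧ a.2 = b.1

lemma pvH0Eq (state : List Int) : pvH0 state = compute_heuristic state := by
  unfold pvH0
  rw [pvDouble, PySem.Int.floordiv_eq_ediv_of_pos (by norm_num)]
  exact Int.mul_ediv_cancel_left _ (by norm_num)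

lemma pvInner (state : List Int) (H : Int) (hH : H = compute_heuristic state) (col : Nat)
    (hc : col < state.length) (row : Nat) (a : List Int × Int) (b : Int × Option (Nat × Nat))
    (hab : pvRel state a b) : pvRel state (pvStepA state col a row) (pvStepB state H col b row) := by
  obtain ⟨h1, h2⟩ := hab
  unfold pvStepA pvStepB
  by_cases hne : (row : Int) ≠ state.getD col 0
  · rw [if_pos hne, if_pos hne]
    have hcond : H - conflictsAt state col (state.getD col 0) + conflictsAt state col (row : Int)
        = compute_heuristic (state.set col (row : Int)) := by
      rw [hH]; exact (pvKey state col (row : Int) hc).symm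
    by_cases hlt : compute_heuristic (state.set col (row : Int)) < a.2
    · rw [if_pos hlt, if_pos (by rw [hcond, ← h2]; exact hlt)]
      exact ⟨rfl, hcond.symm⟩
    · rw [if_neg hlt, if_neg (by rw [hcond, ← h2]; exact hlt)]
      exact ⟨h1, h2⟩
  · rw [if_neg hne, if_neg hne]
    exact ⟨h1, h2⟩

lemma pvMainEq (state : List Int) : get_best_neighbor state = get_best_neighbor_alt state := by
  show ((List.range state.length).foldl
      (fun (acc : List Int × Int) col => (List.range state.length).foldl (pvStepA state col) acc)
      (state, compute_heuristic state))
    = (match ((List.range state.length).foldl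
        (fun (acc : Int × Option (Nat × Nat)) col =>
          (List.range state.length).foldl (pvStepB state (pvH0 state) col) acc)
        (pvH0 state, none)).2 with
      | none => (state, ((List.range state.length).foldl
          (fun (acc : Int × Option (Nat × Nat)) col =>
            (List.range state.length).foldl (pvStepB state (pvH0 state) col) acc)
          (pvH0 state, none)).1)
      | some (c, r) => (state.set c (r : Int), ((List.range state.length).foldl
          (fun (acc : Int × Option (Nat × Nat)) col =>
            (List.range state.length).foldl (pvStepB state (pvH0 state) col) acc)
          (pvH0 state, none)).1))
  set RB := (List.range state.length).foldl
      (fun (acc : Int × Option (Nat × Nat)) col =>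
        (List.range state.length).foldl (pvStepB state (pvH0 state) col) acc)
      (pvH0 state, none) with hRB
  have hmain : pvRel state
      ((List.range state.length).foldl
        (fun (acc : List Int × Int) col => (List.range state.length).foldl (pvStepA state col) acc)
        (state, compute_heuristic state)) RB := by
    rw [hRB]
    exact pvFoldlRel (pvRel state) _ _ (List.range state.length)
      (fun col hcol a b hab => pvFoldlRel (pvRel state) _ _ (List.range state.length)
        (fun row _ a b hab =>
          pvInner state (pvH0 state) (pvH0Eq state) col (List.mem_range.mp hcol) row a b hab) hab)
      ⟨rfl, (pvH0Eq state).symm⟩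
  obtain ⟨h1, h2⟩ := hmain
  cases hmo : RB.2 with
  | none => exact Prod.ext_iff.mpr ⟨by rw [h1, hmo]; rfl, h2⟩
  | some p =>
    obtain ⟨c, r⟩ := p
    exact Prod.ext_iff.mpr ⟨by rw [h1, hmo]; rfl, h2⟩

-- ===== VERDICT (by name: the statement is the Claim_ definition above) =====
theorem get_best_neighbor_spec : Claim_equal_get_best_neighbor := by
  intro state _
  show get_best_neighbor state = get_best_neighbor_alt state
  exact pvMainEq state
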